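-- pv_equiv track=rewrite | github.com/PhiloTFarnsworth/MarketMePostMortem | MMcalendar/MMiCAL/MMiCal.py | checkEscapedColon
-- ===== SOURCE A (Python) =====
-- def checkEscapedColon(phrase, tentativeProperty, recursed=0):
--     """
--         checkEscapedColon checks for colons escaped by doubles quotes in a value of a parameter
--         when reading an ics phrase.  This Function takes a complete PROP;PARAM=VALUE;...:VALUE
--         'phrase', along with the initial 'tentativeProperty' of how the phrase should be split.
--         Recursed is to be left as default, is used as a counter to properly consider
--         progressively longer strings.  Returns the entire PROP;PARAM=VALUE;...: string.
--     """
--     correctString = ''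
--     if tentativeProperty.find('"') != -1:
--         checkDQoutes = tentativeProperty.split('"')
--         ## if checkDQoutes is an even number of strings we have an unclosed dqoute
--         if len(checkDQoutes) % 2 == 0:
--             colonHunter = phrase.split(":")
--             recursed += 1
--             potentialPropVal = ''
--             for i in range(recursed + 1):
--                 potentialPropVal += colonHunter[i] + ":"
--             escaped = checkEscapedColon(phrase, potentialPropVal, recursed=recursed)
--             if len(escaped.split('"')) % 2 == 1:
--                 correctString += escaped.rstrip(":")
--         else:
--             correctString += tentativeProperty
--     else:
--         correctString += tentativeProperty
--     return correctString
-- ===== SOURCE B (Python) =====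
-- def checkEscapedColon(phrase, tentativeProperty, recursed=0):
--     """Iterative re-implementation: track the running quote parity of the
--     colon-prefix instead of recursing and rebuilding the candidate string."""
--     if tentativeProperty.count('"') % 2 == 0:
--         return tentativeProperty
--     pieces = phrase.split(':')
--     quotes = 0
--     for i in range(recursed + 1):
--         quotes += pieces[i].count('"')
--     r = recursed
--     while True:
--         r += 1
--         quotes += pieces[r].count('"')
--         if quotes % 2 == 0:
--             return ':'.join(pieces[:r + 1]).rstrip(':')
-- ===== Notes on version B (the rewrite author's own statement) =====
-- stated objective: alternative
-- what changed: A recurses, rebuilding the candidate PROP prefix string from scratch at every level and re-splitting it to test quote balance; B does one iterative pass that keeps a running quote count over the colon-split pieces and builds the result string only once at the end.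
-- outside the precondition, e.g. on checkEscapedColon('a:"', '"', -2): A returns '', B returns 'a:"'
import Mathlib
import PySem

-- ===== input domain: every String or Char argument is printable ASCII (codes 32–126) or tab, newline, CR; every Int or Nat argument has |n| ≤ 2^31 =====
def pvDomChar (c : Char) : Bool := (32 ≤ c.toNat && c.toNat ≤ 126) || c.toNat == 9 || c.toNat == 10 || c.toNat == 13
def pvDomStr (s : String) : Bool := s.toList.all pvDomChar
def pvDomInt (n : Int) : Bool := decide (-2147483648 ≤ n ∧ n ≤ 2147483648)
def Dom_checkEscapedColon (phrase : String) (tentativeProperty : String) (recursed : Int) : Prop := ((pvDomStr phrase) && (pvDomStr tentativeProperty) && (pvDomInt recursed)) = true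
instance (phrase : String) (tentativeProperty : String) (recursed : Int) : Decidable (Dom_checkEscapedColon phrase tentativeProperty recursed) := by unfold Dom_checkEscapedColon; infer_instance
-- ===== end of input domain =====

-- B replaces A's recursion (which rebuilds each candidate prefix from scratch at every level) by a
-- single loop that keeps a running quote count and builds the result string once; objective: alternative.

-- ===== PORT A =====
-- hand port of Python's s.rstrip(":"): drop ALL trailing ':' characters (exact for this one-char strip set)
def pvRstripColon (l : List Char) : List Char := (l.reverse.dropWhile (fun c => c == ':')).reverse

-- Python loop `for i in range(k+1): potentialPropVal += colonHunter[i] + ":"` with Option for IndexError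
def pvBuildPV (pieces : List (List Char)) (k : Int) : Option (List Char) :=
  (PySem.List.pyRange 0 (k + 1)).foldl
    (fun acc i => match acc, PySem.List.pyGet? pieces i with
      | some s, some p => some (s ++ p ++ [':'])
      | _, _ => none) (some [])

-- termination helpers for the recursion of port A (cited in decreasing_by)
theorem pvBuildPV_absorb (pieces : List (List Char)) (l : List Int) :
    l.foldl (fun acc i => match acc, PySem.List.pyGet? pieces i with
      | some s, some p => some (s ++ p ++ [':'])
      | _, _ => none) (none : Option (List Char)) = none := by
  induction l with
  | nil => rfl
  | cons a t ih => simpa using ih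

theorem pvBuildPV_some_bound {pieces : List (List Char)} {k : Int} {pv : List Char}
    (h : pvBuildPV pieces k = some pv) : k < pieces.length ∨ k < 0 := by
  by_contra hc
  have h1 : (pieces.length : Int) ≤ k := by omega
  have h2 : 0 ≤ k := by omega
  have hsplit : PySem.List.pyRange 0 (k + 1)
      = PySem.List.pyRange 0 (pieces.length : Int) ++ PySem.List.pyRange (pieces.length : Int) (k + 1) :=
    PySem.List.pyRange_one_append 0 (pieces.length : Int) (k + 1) (by positivity) (by omega)
  have hcons : PySem.List.pyRange (pieces.length : Int) (k + 1)
      = (pieces.length : Int) :: PySem.List.pyRange ((pieces.length : Int) + 1) (k + 1) :=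
    PySem.List.pyRange_one_cons (by omega)
  have hget : PySem.List.pyGet? pieces (pieces.length : Int) = none := by
    unfold PySem.List.pyGet? PySem.List.pyIdx?
    split_ifs <;> simp_all
  unfold pvBuildPV at h
  rw [hsplit, List.foldl_append, hcons, List.foldl_cons, hget] at h
  set acc := (PySem.List.pyRange 0 (pieces.length : Int)).foldl
    (fun acc i => match acc, PySem.List.pyGet? pieces i with
      | some s, some p => some (s ++ p ++ [':'])
      | _, _ => none) (some ([] : List Char)) with hacc
  rcases acc with _ | s
  · exact absurd ((pvBuildPV_absorb pieces
      (PySem.List.pyRange ((pieces.length : Int) + 1) (k + 1))).symm.trans h) (by simp)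
  · exact absurd ((pvBuildPV_absorb pieces
      (PySem.List.pyRange ((pieces.length : Int) + 1) (k + 1))).symm.trans h) (by simp)

def checkEscapedColonCore (phrase : List Char) (tp : List Char) (recursed : Int) : List Char :=
  if PySem.Chars.find tp ['"'] ≠ -1 then
    if (PySem.Chars.splitOn tp ['"']).length % 2 = 0 then
      match hpv : pvBuildPV (PySem.Chars.splitOn phrase [':']) (recursed + 1) with
      | none => []  -- Python raises IndexError here (excluded by Pre_)
      | some pv =>
        let escaped := checkEscapedColonCore phrase pv (recursed + 1)
        if (PySem.Chars.splitOn escaped ['"']).length % 2 = 1 then pvRstripColon escaped else []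
    else tp
  else tp
termination_by (((PySem.Chars.splitOn phrase [':']).length : Int) + 1 - recursed).toNat
decreasing_by
  have := pvBuildPV_some_bound hpv
  omega

def checkEscapedColon (phrase : String) (tentativeProperty : String) (recursed : Int) : String :=
  String.ofList (checkEscapedColonCore phrase.toList tentativeProperty.toList recursed)

-- ===== PORT B =====
-- Python loop `for i in range(k): quotes += pieces[i].count('"')` with Option for IndexError
def pvInitQuotes (pieces : List (List Char)) (k : Int) : Option Nat :=
  (PySem.List.pyRange 0 k).foldl
    (fun acc i => match acc, PySem.List.pyGet? pieces i with
      | some q, some p => some (q + PySem.Chars.count p ['"'])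
      | _, _ => none) (some 0)

-- termination helper for the loop of port B (cited in decreasing_by)
theorem pvPyGet?_some_bound {α : Type} {l : List α} {i : Int} {a : α}
    (h : PySem.List.pyGet? l i = some a) : i < l.length := by
  unfold PySem.List.pyGet? PySem.List.pyIdx? at h
  split_ifs at h <;> simp_all
  omega

-- Python `while True: r += 1; quotes += pieces[r].count('"'); if quotes % 2 == 0: return ...`
-- (the body is entered with r already incremented)

-- Python `while True: r += 1; quotes += pieces[r].count('"'); if quotes % 2 == 0: return ...`
-- (pvAltLoop's r is the already-incremented index)
def pvAltLoop (pieces : List (List Char)) (r : Int) (q : Nat) : List Char :=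
  match hp : PySem.List.pyGet? pieces r with
  | none => []  -- Python raises IndexError here (excluded by Pre_)
  | some p =>
    let q' := q + PySem.Chars.count p ['"']
    if q' % 2 = 0 then
      pvRstripColon (PySem.Chars.join [':'] (PySem.List.slice pieces none (some (r + 1))))
    else pvAltLoop pieces (r + 1) q'
termination_by ((pieces.length : Int) - r).toNat
decreasing_by
  have := pvPyGet?_some_bound hp
  omega

def checkEscapedColonAltCore (phrase : List Char) (tp : List Char) (recursed : Int) : List Char :=
  if PySem.Chars.count tp ['"'] % 2 = 0 then tp
  else
    let pieces := PySem.Chars.splitOn phrase [':']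
    match pvInitQuotes pieces (recursed + 1) with
    | none => []  -- Python raises IndexError here (excluded by Pre_)
    | some q => pvAltLoop pieces (recursed + 1) q

def checkEscapedColon_alt (phrase : String) (tentativeProperty : String) (recursed : Int) : String :=
  String.ofList (checkEscapedColonAltCore phrase.toList tentativeProperty.toList recursed)

-- ===== PRECONDITION & SPEC =====
-- quote count of the colon-prefix of `pieces` ending at piece r (inclusive)
def pvPrefQ (pieces : List (List Char)) (r : Nat) : Nat :=
  ((pieces.take (r + 1)).map (fun p => PySem.Chars.count p ['"'])).sum

-- Pre_ excludes the inputs on which A raises IndexError (an unbalanced tentativeProperty whose quotes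
-- never rebalance along the colon-split of phrase), and calls passing recursed < -1 together with an
-- unbalanced tentativeProperty, where A's accidentally empty loop range returns '' while B's negative
-- list index wraps around.
def Pre_checkEscapedColon (phrase : String) (tentativeProperty : String) (recursed : Int) : Prop :=
  PySem.Str.count tentativeProperty "\"" % 2 = 0 ∨
  (-1 ≤ recursed ∧ ∃ r ∈ List.range (PySem.Chars.splitOn phrase.toList [':']).length,
      recursed + 1 ≤ (r : Int) ∧ pvPrefQ (PySem.Chars.splitOn phrase.toList [':']) r % 2 = 0)
instance (phrase : String) (tentativeProperty : String) (recursed : Int) : Decidable (Pre_checkEscapedColon phrase tentativeProperty recursed) := by unfold Pre_checkEscapedColon; infer_instance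

def pvWitness_checkEscapedColon : String × String × Int := ("a\"b:c\"d:e", "a\"b", 0)

def Spec_checkEscapedColon (phrase : String) (tentativeProperty : String) (recursed : Int) (out : String) : Prop := out = checkEscapedColon_alt phrase tentativeProperty recursed
instance (phrase : String) (tentativeProperty : String) (recursed : Int) (out : String) : Decidable (Spec_checkEscapedColon phrase tentativeProperty recursed out) := by unfold Spec_checkEscapedColon; infer_instance

-- ===== CLAIM (what is proved, stated in full; the proofs are below) =====
def Claim_equal_checkEscapedColon : Prop := ∀ (phrase : String) (tentativeProperty : String) (recursed : Int), Dom_checkEscapedColon phrase tentativeProperty recursed → Pre_checkEscapedColon phrase tentativeProperty recursed → Spec_checkEscapedColon phrase tentativeProperty recursed (checkEscapedColon phrase tentativeProperty recursed)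

-- ===== LEMMAS AND PROOFS =====
theorem count_go_singleton (c : Char) : ∀ (fuel : Nat) (l : List Char) (acc : Nat),
    l.length ≤ fuel → PySem.Chars.count.go [c] fuel l acc = acc + l.count c := by
  intro fuel
  induction fuel with
  | zero => intro l acc h; cases l with
    | nil => simp [PySem.Chars.count.go]
    | cons a t => simp at h
  | succ n ih =>
    intro l acc h
    cases l with
    | nil => simp [PySem.Chars.count.go]
    | cons a t =>
      simp only [PySem.Chars.count.go, List.isPrefixOf, Bool.and_true]
      by_cases hc : c == a
      · simp only [hc, if_pos, List.drop_succ_cons, List.length_nil, List.length_cons, List.drop_zero]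
        rw [ih t (acc + 1) (by simpa using h), List.count_cons]
        simp [show (a == c) = true by simpa [BEq.comm] using hc]
        omega
      · simp only [Bool.not_eq_true] at hc
        simp only [hc, Bool.false_eq_true, if_false]
        rw [ih t acc (by simpa using h), List.count_cons]
        simp [show (a == c) = false by simpa [BEq.comm] using hc]

theorem count_singleton (s : List Char) (c : Char) : PySem.Chars.count s [c] = s.count c := by
  unfold PySem.Chars.count
  simp [count_go_singleton c s.length s 0 le_rfl]

theorem splitOn_go_length (c : Char) : ∀ (fuel : Nat) (l cur : List Char) (acc : List (List Char)),
    l.length ≤ fuel → (PySem.Chars.splitOn.go [c] fuel l cur acc).length = acc.length + 1 + l.count c := by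
  intro fuel
  induction fuel with
  | zero => intro l cur acc h; cases l with
    | nil => simp [PySem.Chars.splitOn.go]
    | cons a t => simp at h
  | succ n ih =>
    intro l cur acc h
    cases l with
    | nil => simp [PySem.Chars.splitOn.go]
    | cons a t =>
      simp only [PySem.Chars.splitOn.go, List.isPrefixOf, Bool.and_true]
      by_cases hc : c == a
      · simp only [hc, if_pos, List.drop_succ_cons, List.length_nil, List.length_cons, List.drop_zero]
        rw [ih t [] (cur.reverse :: acc) (by simpa using h), List.count_cons]
        simp [show (a == c) = true by simpa [BEq.comm] using hc]
        omega
      · simp only [Bool.not_eq_true] at hc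
        simp only [hc, Bool.false_eq_true, if_false]
        rw [ih t (a :: cur) acc (by simpa using h), List.count_cons]
        simp [show (a == c) = false by simpa [BEq.comm] using hc]

theorem splitOn_length (s : List Char) (c : Char) :
    (PySem.Chars.splitOn s [c]).length = s.count c + 1 := by
  unfold PySem.Chars.splitOn
  rw [splitOn_go_length c (s.length + 1) s [] [] (by omega)]
  simp [Nat.add_comm]

theorem rstrip_append_colon (l : List Char) : pvRstripColon (l ++ [':']) = pvRstripColon l := by
  unfold pvRstripColon
  simp [List.reverse_append]

theorem rstrip_idem (l : List Char) : pvRstripColon (pvRstripColon l) = pvRstripColon l := by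
  unfold pvRstripColon
  rw [List.reverse_reverse, List.dropWhile_idempotent]

theorem count_rstrip (l : List Char) (c : Char) (hc : c ≠ ':') :
    (pvRstripColon l).count c = l.count c := by
  unfold pvRstripColon
  rw [List.count_reverse]
  conv_rhs => rw [← List.count_reverse, ← List.takeWhile_append_dropWhile (p := fun c => c == ':') (l := l.reverse)]
  rw [List.count_append]
  have : (l.reverse.takeWhile (fun c => c == ':')).count c = 0 := by
    rw [List.count_eq_zero]
    intro hmem
    have := List.mem_takeWhile_imp hmem
    simp at this
    exact hc (by simp [this])
  omega

-- flatten of colon-terminated pieces vs join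

theorem flatten_eq_join_append (l : List (List Char)) (hne : l ≠ []) :
    (l.map (fun p => p ++ [':'])).flatten = PySem.Chars.join [':'] l ++ [':'] := by
  induction l with
  | nil => simp at hne
  | cons a t ih =>
    cases t with
    | nil => simp [PySem.Chars.join_singleton]
    | cons b t2 =>
      rw [PySem.Chars.join_cons_cons]
      simp only [List.map_cons, List.flatten_cons] at *
      rw [ih (by simp)]
      simp

theorem pvPyGet?_valid {α : Type} (l : List α) (i : Int) (h0 : 0 ≤ i) (h1 : i < l.length) :
    PySem.List.pyGet? l i = l[i.toNat]? := by
  unfold PySem.List.pyGet? PySem.List.pyIdx?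
  split_ifs <;> simp_all

theorem pvPyGet?_eq_some {α : Type} (l : List α) (m : Nat) (h : m < l.length) :
    PySem.List.pyGet? l (m : Int) = some l[m] := by
  rw [pvPyGet?_valid l m (by positivity) (by exact_mod_cast h)]
  simp only [Int.toNat_natCast]
  exact List.getElem?_eq_getElem h

def pvCandA (pieces : List (List Char)) (r : Nat) : List Char :=
  ((pieces.take (r + 1)).map (fun p => p ++ [':'])).flatten

theorem buildPV_fold (pieces : List (List Char)) : ∀ (m : Nat), m ≤ pieces.length → ∀ (s : List Char),
    (PySem.List.pyRange 0 (m : Int)).foldl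
      (fun acc i => match acc, PySem.List.pyGet? pieces i with
        | some s, some p => some (s ++ p ++ [':'])
        | _, _ => none) (some s)
    = some (s ++ ((pieces.take m).map (fun p => p ++ [':'])).flatten) := by
  intro m
  induction m with
  | zero => intro h s; simp [PySem.List.pyRange]
  | succ n ih =>
    intro h s
    rw [show ((n + 1 : Nat) : Int) = (n : Int) + 1 by push_cast; ring,
      PySem.List.pyRange_one_succ_right (by positivity), List.foldl_append,
      ih (by omega) s, List.foldl_cons, List.foldl_nil]
    rw [pvPyGet?_eq_some pieces n (by omega)]
    rw [show pieces.take (n + 1) = pieces.take n ++ [pieces[n]] from by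
          rw [List.take_add_one]
          simp [List.getElem?_eq_getElem (by omega : n < pieces.length)],
        List.map_append, List.flatten_append]
    simp [List.append_assoc]
    rfl

theorem buildPV_eq (pieces : List (List Char)) (r : Nat) (h : r < pieces.length) :
    pvBuildPV pieces (r : Int) = some (pvCandA pieces r) := by
  unfold pvBuildPV pvCandA
  rw [show ((r : Int) + 1) = ((r + 1 : Nat) : Int) by push_cast; ring,
    buildPV_fold pieces (r + 1) (by omega) []]
  simp

def pvSumQ (pieces : List (List Char)) (m : Nat) : Nat :=
  ((pieces.take m).map (fun p => p.count '"')).sum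

theorem sumQ_succ (pieces : List (List Char)) (n : Nat) (h : n < pieces.length) :
    pvSumQ pieces (n + 1) = pvSumQ pieces n + pieces[n].count '"' := by
  unfold pvSumQ
  rw [show pieces.take (n + 1) = pieces.take n ++ [pieces[n]] from by
        rw [List.take_add_one]
        simp [List.getElem?_eq_getElem (by omega : n < pieces.length)]]
  rw [List.map_append, List.sum_append]
  simp

theorem count_flatten_colon (l : List (List Char)) :
    ((l.map (fun p => p ++ [':'])).flatten).count '"' = (l.map (fun p => p.count '"')).sum := by
  induction l with
  | nil => simp
  | cons a t ih => simp [List.count_append, ih]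

theorem count_candA (pieces : List (List Char)) (r : Nat) :
    (pvCandA pieces r).count '"' = pvSumQ pieces (r + 1) := by
  unfold pvCandA pvSumQ
  rw [count_flatten_colon]

theorem count_join_colon (l : List (List Char)) (hne : l ≠ []) :
    (PySem.Chars.join [':'] l).count '"' = (l.map (fun p => p.count '"')).sum := by
  have h := congrArg (fun x => x.count '"') (flatten_eq_join_append l hne)
  simp only [List.count_append] at h
  rw [count_flatten_colon] at h
  simp at h
  exact h.symm

theorem initQuotes_fold (pieces : List (List Char)) : ∀ (m : Nat), m ≤ pieces.length → ∀ (q : Nat),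
    (PySem.List.pyRange 0 (m : Int)).foldl
      (fun acc i => match acc, PySem.List.pyGet? pieces i with
        | some q, some p => some (q + PySem.Chars.count p ['"'])
        | _, _ => none) (some q)
    = some (q + pvSumQ pieces m) := by
  intro m
  induction m with
  | zero => intro h q; simp [PySem.List.pyRange, pvSumQ]
  | succ n ih =>
    intro h q
    rw [show ((n + 1 : Nat) : Int) = (n : Int) + 1 by push_cast; ring,
      PySem.List.pyRange_one_succ_right (by positivity), List.foldl_append,
      ih (by omega) q, List.foldl_cons, List.foldl_nil]
    rw [pvPyGet?_eq_some pieces n (by omega)]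
    exact congrArg some (by
      rw [count_singleton, sumQ_succ pieces n (by omega)]
      omega)

theorem initQuotes_eq (pieces : List (List Char)) (m : Nat) (h : m ≤ pieces.length) :
    pvInitQuotes pieces (m : Int) = some (pvSumQ pieces m) := by
  unfold pvInitQuotes
  rw [initQuotes_fold pieces m h 0]
  simp

-- termination helper for the port's recursion (cited in decreasing_by)

theorem odd_find_ne (tp : List Char) (h : tp.count '"' % 2 = 1) :
    PySem.Chars.find tp ['"'] ≠ -1 := by
  have hmem : '"' ∈ tp := by
    by_contra hno
    rw [List.count_eq_zero_of_not_mem hno] at h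
    omega
  rw [Ne, PySem.Chars.find_eq_neg_one_iff, List.singleton_infix_iff]
  exact not_not_intro hmem

theorem A_even (phrase tp : List Char) (recursed : Int) (h : tp.count '"' % 2 = 0) :
    checkEscapedColonCore phrase tp recursed = tp := by
  unfold checkEscapedColonCore
  by_cases hf : PySem.Chars.find tp ['"'] = -1
  · rw [if_neg (by simpa using hf)]
  · rw [if_pos hf, if_neg (by rw [splitOn_length]; omega)]

theorem A_loop (phrase : List Char) (rstar : Nat)
    (hrn : rstar < (PySem.Chars.splitOn phrase [':']).length)
    (heven : pvSumQ (PySem.Chars.splitOn phrase [':']) (rstar + 1) % 2 = 0) :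
    ∀ (fuel m : Nat) (tp : List Char), rstar + 1 - m ≤ fuel → m ≤ rstar →
    (∀ j, m ≤ j → j < rstar → pvSumQ (PySem.Chars.splitOn phrase [':']) (j + 1) % 2 = 1) →
    tp.count '"' % 2 = 1 →
    checkEscapedColonCore phrase tp ((m : Int) - 1)
      = pvRstripColon (PySem.Chars.join [':'] ((PySem.Chars.splitOn phrase [':']).take (rstar + 1))) := by
  intro fuel
  induction fuel with
  | zero => intro m tp hfe hm _ _; omega
  | succ n ih =>
    intro m tp hfe hm hmin hodd
    set ps := PySem.Chars.splitOn phrase [':'] with hps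
    unfold checkEscapedColonCore
    rw [if_pos (odd_find_ne tp hodd), if_pos (by rw [splitOn_length]; omega)]
    rw [show (m : Int) - 1 + 1 = (m : Int) by ring]
    rw [← hps, buildPV_eq ps m (by omega)]
    show (if (PySem.Chars.splitOn (checkEscapedColonCore phrase (pvCandA ps m) ((m : Int))) ['"']).length % 2 = 1
        then pvRstripColon (checkEscapedColonCore phrase (pvCandA ps m) ((m : Int))) else [])
      = pvRstripColon (PySem.Chars.join [':'] (ps.take (rstar + 1)))
    have hcand : (pvCandA ps m).count '"' = pvSumQ ps (m + 1) := count_candA ps m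
    have htakene : ps.take (rstar + 1) ≠ [] := by
      have : (ps.take (rstar + 1)).length = rstar + 1 := by
        rw [List.length_take]; omega
      intro hz; rw [hz] at this; simp at this
    by_cases hm2 : m = rstar
    · subst hm2
      rw [A_even phrase (pvCandA ps m) (m : Int) (by rw [hcand]; omega)]
      rw [if_pos (by rw [splitOn_length, hcand]; omega)]
      unfold pvCandA
      rw [flatten_eq_join_append _ htakene, rstrip_append_colon]
    · have hlt : m < rstar := by omega
      have hih := ih (m + 1) (pvCandA ps m) (by omega) (by omega)
        (fun j hj1 hj2 => hmin j (by omega) hj2)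
        (by rw [hcand]; exact hmin m (by omega) hlt)
      rw [show (m : Int) = ((m + 1 : Nat) : Int) - 1 by push_cast; ring, hih]
      rw [if_pos (by
        rw [splitOn_length, count_rstrip _ _ (by decide), count_join_colon _ htakene]
        have : ((ps.take (rstar + 1)).map (fun p => p.count '"')).sum = pvSumQ ps (rstar + 1) := rfl
        omega)]
      rw [rstrip_idem]

theorem B_loop (ps : List (List Char)) (rstar : Nat)
    (hrn : rstar < ps.length)
    (heven : pvSumQ ps (rstar + 1) % 2 = 0) :
    ∀ (fuel m : Nat), rstar + 1 - m ≤ fuel → m ≤ rstar →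
    (∀ j, m ≤ j → j < rstar → pvSumQ ps (j + 1) % 2 = 1) →
    pvAltLoop ps (m : Int) (pvSumQ ps m)
      = pvRstripColon (PySem.Chars.join [':'] (ps.take (rstar + 1))) := by
  intro fuel
  induction fuel with
  | zero => intro m hfe hm _; omega
  | succ n ih =>
    intro m hfe hm hmin
    unfold pvAltLoop
    rw [pvPyGet?_eq_some ps m (by omega)]
    show (if (pvSumQ ps m + PySem.Chars.count ps[m] ['"']) % 2 = 0
        then pvRstripColon (PySem.Chars.join [':'] (PySem.List.slice ps none (some ((m : Int) + 1))))
        else pvAltLoop ps ((m : Int) + 1) (pvSumQ ps m + PySem.Chars.count ps[m] ['"']))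
      = pvRstripColon (PySem.Chars.join [':'] (ps.take (rstar + 1)))
    rw [show pvSumQ ps m + PySem.Chars.count ps[m] ['"'] = pvSumQ ps (m + 1) by
      rw [count_singleton, sumQ_succ ps m (by omega)]]
    by_cases hm2 : m = rstar
    · subst hm2
      rw [if_pos heven]
      rw [PySem.List.slice_to ps (by positivity),
        show ((m : Int) + 1).toNat = m + 1 from by omega]
    · have hlt : m < rstar := by omega
      rw [if_neg (by have := hmin m (by omega) hlt; omega)]
      rw [show (m : Int) + 1 = ((m + 1 : Nat) : Int) by push_cast; ring]
      exact ih (m + 1) (by omega) (by omega) (fun j hj1 hj2 => hmin j (by omega) hj2)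

theorem prefQ_eq_sumQ (pieces : List (List Char)) (r : Nat) :
    pvPrefQ pieces r = pvSumQ pieces (r + 1) := by
  unfold pvPrefQ pvSumQ
  congr 1
  exact List.map_congr_left (fun p _ => count_singleton p '"')

theorem core_equiv (phrase tp : List Char) (recursed : Int)
    (hpre : PySem.Chars.count tp ['"'] % 2 = 0 ∨
      (-1 ≤ recursed ∧ ∃ r ∈ List.range (PySem.Chars.splitOn phrase [':']).length,
        recursed + 1 ≤ (r : Int) ∧ pvPrefQ (PySem.Chars.splitOn phrase [':']) r % 2 = 0)) :
    checkEscapedColonCore phrase tp recursed = checkEscapedColonAltCore phrase tp recursed := by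
  by_cases heventp : PySem.Chars.count tp ['"'] % 2 = 0
  · rw [A_even phrase tp recursed (by rw [← count_singleton]; omega)]
    unfold checkEscapedColonAltCore
    rw [if_pos heventp]
  · rcases hpre with h | ⟨hrec, r, hrmem, hrge, hreven⟩
    · contradiction
    set ps := PySem.Chars.splitOn phrase [':'] with hps
    have hodd : tp.count '"' % 2 = 1 := by
      rw [← count_singleton] at *
      omega
    have hex : ∃ j : Nat, recursed + 1 ≤ (j : Int) ∧ j < ps.length ∧ pvSumQ ps (j + 1) % 2 = 0 :=
      ⟨r, hrge, by simpa using hrmem, by rw [← prefQ_eq_sumQ]; exact hreven⟩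
    set rstar := Nat.find hex with hrstar
    obtain ⟨hge, hlt, hev⟩ := Nat.find_spec hex
    have hmin := fun j hj => Nat.find_min hex (m := j) hj
    set m0 : Nat := (recursed + 1).toNat with hm0
    have hm0i : (m0 : Int) = recursed + 1 := Int.toNat_of_nonneg (by omega)
    have hm0le : m0 ≤ rstar := by omega
    have hminN : ∀ j, m0 ≤ j → j < rstar → pvSumQ ps (j + 1) % 2 = 1 := by
      intro j h1 h2
      by_contra hc
      exact hmin j h2 ⟨by omega, by omega, by omega⟩
    have hA : checkEscapedColonCore phrase tp recursed
        = pvRstripColon (PySem.Chars.join [':'] (ps.take (rstar + 1))) := by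
      have hres := A_loop phrase rstar hlt hev (rstar + 1) m0 tp (by omega) hm0le hminN hodd
      rw [show (m0 : Int) - 1 = recursed by omega] at hres
      exact hres
    have hB : checkEscapedColonAltCore phrase tp recursed
        = pvRstripColon (PySem.Chars.join [':'] (ps.take (rstar + 1))) := by
      unfold checkEscapedColonAltCore
      rw [if_neg heventp]
      show (match pvInitQuotes ps (recursed + 1) with
            | none => []
            | some q => pvAltLoop ps (recursed + 1) q)
          = pvRstripColon (PySem.Chars.join [':'] (ps.take (rstar + 1)))
      rw [show recursed + 1 = ((m0 : Nat) : Int) from by omega]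
      rw [initQuotes_eq ps m0 (by omega)]
      show pvAltLoop ps ((m0 : Nat) : Int) (pvSumQ ps m0)
          = pvRstripColon (PySem.Chars.join [':'] (ps.take (rstar + 1)))
      exact B_loop ps rstar hlt hev (rstar + 1) m0 (by omega) hm0le hminN
    rw [hA, hB]

-- ===== VERDICT (by name: the statement is the Claim_ definition above) =====
theorem checkEscapedColon_spec : Claim_equal_checkEscapedColon := by
  intro phrase tp recursed _ hpre
  unfold Spec_checkEscapedColon checkEscapedColon checkEscapedColon_alt
  refine congrArg String.ofList (core_equiv phrase.toList tp.toList recursed ?_)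
  unfold Pre_checkEscapedColon at hpre
  rcases hpre with h | h
  · left
    rw [PySem.Str.count_eq, show ("\"" : String).toList = ['"'] from rfl] at h
    exact h
  · right
    exact h
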